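-- pv_equiv track=rewrite | github.com/vczhfan/cs61a | projects/hog/hog.py | final_strategy
-- ===== SOURCE A (Python) =====
-- def make_comeback_strategy(margin, num_rolls=5):
--     """Return a strategy that rolls one extra time when losing by MARGIN."""
--     "*** YOUR CODE HERE ***"
--     def make_comeback_strategy_wrapper(score, opponent_score):
--         return (num_rolls + 1) if (opponent_score - score) >= margin else num_rolls
--     return make_comeback_strategy_wrapper
--
-- def make_mean_strategy(min_points, num_rolls=5):
--     """Return a strategy that attempts to give the opponent problems."""
--     "*** YOUR CODE HERE ***"
--     def make_mean_strategy_wrapper(score, opponent_score):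
--         free_bacon = opponent_score // 10 % 10 + 1
--         if (min_points <= free_bacon) \
--             and (((score + free_bacon + opponent_score)%10 == 7) \
--             or ((score + free_bacon + opponent_score)%7 == 0)):
--             return 0
--         else:
--             return num_rolls
--     return make_mean_strategy_wrapper
--
-- def final_strategy(score, opponent_score):
--     """Write a brief description of your final strategy.
--
--     *** YOUR DESCRIPTION HERE ***
--     """
--     "*** YOUR CODE HERE ***"
--     n = 5
--     score_loop, opponent_score_loop = 90, 90
--
--     while score_loop != 100: # this will check for one turn win by taking advantage of the free bacon rule
--         if opponent_score >= opponent_score_loop and score >= score_loop: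
--             return 0
--         score_loop += 1
--         opponent_score_loop -= 10
--
--     if (score - opponent_score) >= 12: # win margin
--         n = 4
--     if (score - opponent_score) >= 30: # win margin
--         n = 3
--     if (opponent_score - score) >= 24: # lose margin
--         n = 7
--     if (opponent_score - score) >= 40: # lose margin
--         n = 8
--     n = make_comeback_strategy(7, n)(score, opponent_score) #lose margin
--     n = make_mean_strategy(5,n)(score, opponent_score) #implement take advantage of rules
--     return n
-- ===== SOURCE B (Python) =====
-- def final_strategy(score, opponent_score):
--     # Flat closed-form version: no loop, no strategy factories.
--     d = score - 90
--     if d >= 0 and opponent_score >= 90 - 10 * (d if d < 9 else 9):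
--         return 0
--     margin = score - opponent_score
--     if margin >= 30:
--         n = 3
--     elif margin >= 12:
--         n = 4
--     elif margin <= -40:
--         n = 8
--     elif margin <= -24:
--         n = 7
--     else:
--         n = 5
--     if -margin >= 7:
--         n += 1
--     free_bacon = opponent_score // 10 % 10 + 1
--     total = score + free_bacon + opponent_score
--     if 5 <= free_bacon and (total % 10 == 7 or total % 7 == 0):
--         return 0
--     return n
-- ===== Notes on version B (the rewrite author's own statement) =====
-- stated objective: simpler
-- what changed: Replaced the 10-iteration while loop with a single closed-form boundary test and inlined the two strategy-factory closures (comeback/mean) into one flat if/elif cascade with no loop and no higher-order functions.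
import Mathlib
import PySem

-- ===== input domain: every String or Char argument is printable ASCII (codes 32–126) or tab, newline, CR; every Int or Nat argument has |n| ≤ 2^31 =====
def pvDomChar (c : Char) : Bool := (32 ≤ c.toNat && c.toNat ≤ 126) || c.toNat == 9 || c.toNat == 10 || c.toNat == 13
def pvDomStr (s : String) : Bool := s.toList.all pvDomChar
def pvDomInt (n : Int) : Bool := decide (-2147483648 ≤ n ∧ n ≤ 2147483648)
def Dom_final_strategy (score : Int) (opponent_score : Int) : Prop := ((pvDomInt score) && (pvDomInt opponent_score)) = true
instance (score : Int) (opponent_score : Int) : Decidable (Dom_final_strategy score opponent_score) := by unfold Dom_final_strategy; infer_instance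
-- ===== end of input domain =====

-- B replaces A's 10-iteration while loop with a closed-form test and inlines the two
-- strategy-factory helpers into one flat if/elif cascade (objective: simpler).

-- ===== PORT A =====
-- the while loop: runs while score_loop != 100, i.e. exactly 10 steps from 90; fuel = 100 - score_loop
def fs_while (score opponent_score : Int) : Nat → Int → Int → Bool
  | 0, _, _ => false
  | k+1, score_loop, opponent_score_loop =>
    if opponent_score ≥ opponent_score_loop ∧ score ≥ score_loop then true
    else fs_while score opponent_score k (score_loop + 1) (opponent_score_loop - 10)

def make_comeback_strategy (margin num_rolls score opponent_score : Int) : Int :=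
  if opponent_score - score ≥ margin then num_rolls + 1 else num_rolls

def make_mean_strategy (min_points num_rolls score opponent_score : Int) : Int :=
  let free_bacon := PySem.Int.mod (PySem.Int.floordiv opponent_score 10) 10 + 1
  if min_points ≤ free_bacon ∧
      (PySem.Int.mod (score + free_bacon + opponent_score) 10 = 7 ∨
       PySem.Int.mod (score + free_bacon + opponent_score) 7 = 0) then 0
  else num_rolls

def final_strategy (score : Int) (opponent_score : Int) : Int :=
  if fs_while score opponent_score 10 90 90 then 0
  else
    let n : Int := 5
    let n := if score - opponent_score ≥ 12 then 4 else n
    let n := if score - opponent_score ≥ 30 then 3 else n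
    let n := if opponent_score - score ≥ 24 then 7 else n
    let n := if opponent_score - score ≥ 40 then 8 else n
    let n := make_comeback_strategy 7 n score opponent_score
    make_mean_strategy 5 n score opponent_score

-- ===== PORT B =====
def final_strategy_alt (score : Int) (opponent_score : Int) : Int :=
  let d := score - 90
  if d ≥ 0 ∧ opponent_score ≥ 90 - 10 * (if d < 9 then d else 9) then 0
  else
    let margin := score - opponent_score
    let n : Int :=
      if margin ≥ 30 then 3
      else if margin ≥ 12 then 4
      else if margin ≤ -40 then 8
      else if margin ≤ -24 then 7
      else 5
    let n := if -margin ≥ 7 then n + 1 else n -- Source B: if -margin >= 7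
    let free_bacon := PySem.Int.mod (PySem.Int.floordiv opponent_score 10) 10 + 1
    let total := score + free_bacon + opponent_score
    if 5 ≤ free_bacon ∧ (PySem.Int.mod total 10 = 7 ∨ PySem.Int.mod total 7 = 0) then 0
    else n

-- ===== PRECONDITION & SPEC =====
def Spec_final_strategy (score : Int) (opponent_score : Int) (out : Int) : Prop := out = final_strategy_alt score opponent_score
instance (score : Int) (opponent_score : Int) (out : Int) : Decidable (Spec_final_strategy score opponent_score out) := by unfold Spec_final_strategy; infer_instance

-- ===== CLAIM (what is proved, stated in full; the proofs are below) =====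
def Claim_equal_final_strategy : Prop := ∀ (score : Int) (opponent_score : Int), Dom_final_strategy score opponent_score → Spec_final_strategy score opponent_score (final_strategy score opponent_score)

-- ===== LEMMAS AND PROOFS =====
set_option maxHeartbeats 2000000 in
theorem fs_while_iff (score opponent_score : Int) :
    fs_while score opponent_score 10 90 90 = true ↔
      (score - 90 ≥ 0 ∧ opponent_score ≥ 90 - 10 * (if score - 90 < 9 then score - 90 else 9)) := by
  constructor
  · intro h
    simp only [fs_while] at h
    split_ifs at h <;> split_ifs <;> omega
  · intro h
    simp only [fs_while]
    split_ifs at h ⊢ <;> first | rfl | omega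

-- ===== VERDICT (by name: the statement is the Claim_ definition above) =====
set_option maxHeartbeats 1000000 in
theorem final_strategy_spec : Claim_equal_final_strategy := by
  intro score opponent_score _
  unfold Spec_final_strategy final_strategy final_strategy_alt make_comeback_strategy make_mean_strategy
  have h := fs_while_iff score opponent_score
  by_cases hc : score - 90 ≥ 0 ∧ opponent_score ≥ 90 - 10 * (if score - 90 < 9 then score - 90 else 9)
  · rw [if_pos (h.mpr hc), if_pos hc]
  · rw [if_neg (fun hb => hc (h.mp hb)), if_neg hc]
    dsimp only
    split_ifs <;> omega
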